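-- pv_equiv track=rewrite | github.com/murray915/COM519 | tab_account.py | check_user_inputs_password
-- ===== SOURCE A (Python) =====
-- def check_user_inputs_password(data_list) -> list:
--     """
--     check user inputs. List passed with username, curr_pass, new_pass 1 & 2
--     Return output list of errors OR blank list
--     """
--
--     output_msg = []
--
--     # check if data input str
--     for i, data in enumerate(data_list):
--         if len(data[1]) == 0:
--             output_msg.append(f'{data[0]}: Is missing input values')
--
--     # check if password meets rules
--     for i in data_list[2:3]:
--
--         # char param to cross check
--         special_characters = "!@#$%^&*()-+?_=,<>/"
--
--         # length check
--         if len(i[1]) < 12: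
--             output_msg.append(f"{i[0]} : Password must be at least 12 characters")
--
--         # captilisation check
--         if not any(c.isupper() for c in i[1]):
--             output_msg.append(f"{i[0]} : Password must contain a capital letter")
--
--         # check if number is present
--         if not any(c.isdigit() for c in i[1]):
--             output_msg.append(f"{i[0]} : Password must contain a number")
--
--         # check if special char is present
--         if not any(c in special_characters for c in i[1]):
--             output_msg.append(f"{i[0]} : Password must contain a special character")
--
--     # check if pass 1 / 2 match
--     if str(data_list[2][1]) != str(data_list[3][1]):
--         output_msg.append("New passwords must match")
--
--     return output_msg
-- ===== SOURCE B (Python) =====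
-- def check_user_inputs_password(data_list) -> list:
--     """
--     check user inputs. List passed with username, curr_pass, new_pass 1 & 2
--     Return output list of errors OR blank list
--     """
--     name, pw = data_list[2]
--     specials = "!@#$%^&*()-+?_=,<>/"
--
--     def classify(c):
--         if c.isupper():
--             return 'U'
--         if c.isdigit():
--             return 'D'
--         if c in specials:
--             return 'S'
--         return '?'
--
--     # the set of character classes present in the password, computed in one pass
--     present = {classify(c) for c in pw}
--
--     # declarative table of (fired, message) rules, in A's emission order
--     table = [(value == '', f'{field}: Is missing input values') for field, value in data_list]
--     table += [
--         (len(pw) < 12, f"{name} : Password must be at least 12 characters"),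
--         ('U' not in present, f"{name} : Password must contain a capital letter"),
--         ('D' not in present, f"{name} : Password must contain a number"),
--         ('S' not in present, f"{name} : Password must contain a special character"),
--         (pw != data_list[3][1], "New passwords must match"),
--     ]
--     return [msg for fired, msg in table if fired]
-- ===== Notes on version B (the rewrite author's own statement) =====
-- stated objective: alternative
-- what changed: A's sequential accumulator loops and three short-circuit any() scans are replaced by a classification pass that computes the SET of character classes present in the password and a declarative (condition, message) rule table emitted by a single filter comprehension.
import Mathlib
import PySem

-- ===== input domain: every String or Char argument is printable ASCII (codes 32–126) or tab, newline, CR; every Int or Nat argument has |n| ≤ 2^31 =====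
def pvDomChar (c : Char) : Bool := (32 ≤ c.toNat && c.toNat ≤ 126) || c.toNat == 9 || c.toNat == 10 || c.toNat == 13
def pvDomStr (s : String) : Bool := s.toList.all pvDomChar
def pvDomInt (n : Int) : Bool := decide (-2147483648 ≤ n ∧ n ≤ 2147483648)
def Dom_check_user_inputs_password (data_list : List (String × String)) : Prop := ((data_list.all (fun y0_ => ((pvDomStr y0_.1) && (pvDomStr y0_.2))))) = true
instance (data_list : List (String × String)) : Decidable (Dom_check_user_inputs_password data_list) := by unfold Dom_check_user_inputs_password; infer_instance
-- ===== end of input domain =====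

-- B replaces A's accumulator loops and three any() scans by a classification pass building the set of
-- character classes present in the password plus a declarative (condition, message) rule table emitted
-- by a single filter (alternative decomposition, same cost).


-- ===== PORT A =====
-- 'c in special_characters' on the single characters of the for-loop is character membership: ported as List.contains (exact for 1-char strings).
def check_user_inputs_password (data_list : List (String × String)) : List String :=
  let output_msg : List String :=
    (PySem.List.enumerate data_list).foldl (fun acc p =>
      if PySem.Str.len p.2.2 == 0 then acc ++ [p.2.1 ++ ": Is missing input values"] else acc) []
  let output_msg :=
    (PySem.List.slice data_list (some 2) (some 3)).foldl (fun acc i =>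
      let specials := "!@#$%^&*()-+?_=,<>/".toList
      let acc := if PySem.Str.len i.2 < 12 then acc ++ [i.1 ++ " : Password must be at least 12 characters"] else acc
      let acc := if !(i.2.toList.any PySem.Chars.isupper) then acc ++ [i.1 ++ " : Password must contain a capital letter"] else acc
      let acc := if !(i.2.toList.any PySem.Chars.isdigit) then acc ++ [i.1 ++ " : Password must contain a number"] else acc
      if !(i.2.toList.any (fun c => specials.contains c)) then acc ++ [i.1 ++ " : Password must contain a special character"] else acc)
      output_msg
  match PySem.List.pyGet? data_list 2, PySem.List.pyGet? data_list 3 with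
  | some p2, some p3 => if p2.2 ≠ p3.2 then output_msg ++ ["New passwords must match"] else output_msg
  | _, _ => output_msg  -- Python raises IndexError here; excluded by Pre_

-- ===== PORT B =====
-- classify(c) of Source B: the class tag of one password character
def pvClassify (sp : List Char) (c : Char) : Char :=
  if PySem.Chars.isupper c then 'U'
  else if PySem.Chars.isdigit c then 'D'
  else if sp.contains c then 'S'
  else '?'

def check_user_inputs_password_alt (data_list : List (String × String)) : List String :=
  match PySem.List.pyGet? data_list 2 with
  | none => []  -- Source B raises IndexError here; excluded by Pre_
  | some p2 =>
    let name := p2.1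
    let pw := p2.2
    let sp := "!@#$%^&*()-+?_=,<>/".toList
    -- the set comprehension {classify(c) for c in pw}
    let present : PySem.Set Char := PySem.Set.ofList (pw.toList.map (pvClassify sp))
    match PySem.List.pyGet? data_list 3 with
    | none => []  -- Source B raises IndexError at data_list[3]; excluded by Pre_
    | some p3 =>
      let table : List (Bool × String) :=
        data_list.map (fun d => (d.2 == "", d.1 ++ ": Is missing input values"))
        ++ [ (decide (PySem.Str.len pw < 12), name ++ " : Password must be at least 12 characters"),
             (!(PySem.Set.contains present 'U'), name ++ " : Password must contain a capital letter"),
             (!(PySem.Set.contains present 'D'), name ++ " : Password must contain a number"),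
             (!(PySem.Set.contains present 'S'), name ++ " : Password must contain a special character"),
             (pw != p3.2, "New passwords must match") ]
      (table.filter (·.1)).map (·.2)

-- ===== PRECONDITION & SPEC =====
-- A indexes data_list[2] and data_list[3] unconditionally (IndexError on shorter lists): exactly those inputs are excluded.
def Pre_check_user_inputs_password (data_list : List (String × String)) : Prop := 4 ≤ data_list.length
instance (data_list : List (String × String)) : Decidable (Pre_check_user_inputs_password data_list) := by unfold Pre_check_user_inputs_password; infer_instance
def pvWitness_check_user_inputs_password : (List (String × String)) :=
  [("username", "bob"), ("curr_pass", "hunter2"), ("new_pass1", "Abcdefghijk1!"), ("new_pass2", "Abcdefghijk1!")]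

def Spec_check_user_inputs_password (data_list : List (String × String)) (out : List String) : Prop := out = check_user_inputs_password_alt data_list
instance (data_list : List (String × String)) (out : List String) : Decidable (Spec_check_user_inputs_password data_list out) := by unfold Spec_check_user_inputs_password; infer_instance

-- ===== CLAIM =====
def Claim_equal_check_user_inputs_password : Prop := ∀ (data_list : List (String × String)), Dom_check_user_inputs_password data_list → Pre_check_user_inputs_password data_list → Spec_check_user_inputs_password data_list (check_user_inputs_password data_list)

-- ===== LEMMAS AND PROOFS =====

-- A's first loop ignores the enumerate index: folding over the enumeration equals folding over the list.
theorem pv_foldl_enumerate_snd {α β : Type} (xs : List α) (s : Int) (g : β → α → β) (init : β) :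
    (PySem.List.enumerate xs s).foldl (fun acc y => g acc y.2) init = xs.foldl g init := by
  induction xs generalizing s init with
  | nil => simp [PySem.List.enumerate_nil]
  | cons x xs ih => simp [PySem.List.enumerate_cons, ih]

-- B's (condition, message) table filtered then projected = filter-then-map of the underlying list.
theorem pv_table_filter {α : Type} (xs : List α) (p : α → Bool) (m : α → String) :
    (((xs.map (fun d => (p d, m d))).filter (·.1)).map (·.2)) = (xs.filter p).map m := by
  induction xs with
  | nil => rfl
  | cons x xs ih =>
    by_cases h : p x = true <;> simp [h, ih]

-- len(v) == 0 is v == '' for strings.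
theorem pv_len_zero (s : String) : (PySem.Str.len s == 0) = (s == "") := by
  simp [PySem.Str.len]

-- no ASCII uppercase letter is a digit
theorem pv_upper_not_digit (c : Char) (h : PySem.Chars.isupper c = true) : PySem.Chars.isdigit c = false := by
  simp only [PySem.Chars.isupper, Bool.and_eq_true, decide_eq_true_eq] at h
  unfold PySem.Chars.isdigit
  simp only [Bool.and_eq_false_iff, decide_eq_false_iff_not]
  right
  intro hc
  exact absurd (le_trans h.1 hc) (by decide)

-- the special characters are neither uppercase letters nor digits
theorem pv_sp_all : ("!@#$%^&*()-+?_=,<>/".toList.all (fun c => !PySem.Chars.isupper c && !PySem.Chars.isdigit c)) = true := by decide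

-- a special character is neither uppercase nor a digit (pointwise form of pv_sp_all)
theorem pv_sp_not (c : Char) (hm : "!@#$%^&*()-+?_=,<>/".toList.contains c = true) :
    PySem.Chars.isupper c = false ∧ PySem.Chars.isdigit c = false := by
  have h := List.all_eq_true.mp pv_sp_all c (by simpa using hm)
  simpa using h

theorem pv_classify_U (c : Char) :
    (pvClassify ("!@#$%^&*()-+?_=,<>/".toList) c = 'U') ↔ PySem.Chars.isupper c = true := by
  unfold pvClassify
  cases hu : PySem.Chars.isupper c with
  | true => simp
  | false => simp only [Bool.false_eq_true, if_false]; split_ifs <;> simp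

theorem pv_classify_D (c : Char) :
    (pvClassify ("!@#$%^&*()-+?_=,<>/".toList) c = 'D') ↔ PySem.Chars.isdigit c = true := by
  unfold pvClassify
  cases hu : PySem.Chars.isupper c with
  | true => simp [pv_upper_not_digit c hu]
  | false =>
    simp only [Bool.false_eq_true, if_false]
    cases hd : PySem.Chars.isdigit c with
    | true => simp
    | false => simp only [Bool.false_eq_true, if_false]; split_ifs <;> simp

theorem pv_classify_S (c : Char) :
    (pvClassify ("!@#$%^&*()-+?_=,<>/".toList) c = 'S') ↔ ("!@#$%^&*()-+?_=,<>/".toList.contains c = true) := by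
  unfold pvClassify
  cases hu : PySem.Chars.isupper c with
  | true =>
    have hsc : "!@#$%^&*()-+?_=,<>/".toList.contains c = false := by
      cases hsc : "!@#$%^&*()-+?_=,<>/".toList.contains c
      · rfl
      · exact absurd (pv_sp_not c hsc).1 (by simp [hu])
    rw [hsc]; simp
  | false =>
    simp only [Bool.false_eq_true, if_false]
    cases hd : PySem.Chars.isdigit c with
    | true =>
      have hsc : "!@#$%^&*()-+?_=,<>/".toList.contains c = false := by
        cases hsc : "!@#$%^&*()-+?_=,<>/".toList.contains c
        · rfl
        · exact absurd (pv_sp_not c hsc).2 (by simp [hd])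
      rw [hsc]; simp
    | false =>
      simp only [Bool.false_eq_true, if_false]
      split_ifs <;> simp_all

-- membership of a tag in the class set equals the corresponding any() scan
theorem pv_present (cs : List Char) (t : Char) (q : Char → Bool)
    (hq : ∀ c, (pvClassify ("!@#$%^&*()-+?_=,<>/".toList) c = t) ↔ q c = true) :
    PySem.Set.contains (PySem.Set.ofList (cs.map (pvClassify ("!@#$%^&*()-+?_=,<>/".toList)))) t
      = cs.any q := by
  rw [Bool.eq_iff_iff]
  rw [PySem.Set.contains_iff]
  simp only [PySem.Set.mem_ofList, List.mem_map, List.any_eq_true]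
  constructor
  · rintro ⟨c, hc, hcl⟩; exact ⟨c, hc, (hq c).1 hcl⟩
  · rintro ⟨c, hc, hcl⟩; exact ⟨c, hc, (hq c).2 hcl⟩

-- ===== VERDICT =====
theorem check_user_inputs_password_spec : Claim_equal_check_user_inputs_password := by
  intro dl _hDom hPre
  unfold Pre_check_user_inputs_password at hPre
  match dl, hPre with
  | x0 :: x1 :: x2 :: x3 :: t, _ =>
    unfold Spec_check_user_inputs_password check_user_inputs_password check_user_inputs_password_alt
    have h2 : PySem.List.pyGet? (x0 :: x1 :: x2 :: x3 :: t) 2 = some x2 := by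
      rw [show (2:Int) = ((2:Nat):Int) from rfl, PySem.List.pyGet?_natCast]; rfl
    have h3 : PySem.List.pyGet? (x0 :: x1 :: x2 :: x3 :: t) 3 = some x3 := by
      rw [show (3:Int) = ((3:Nat):Int) from rfl, PySem.List.pyGet?_natCast]; rfl
    rw [pv_foldl_enumerate_snd (x0 :: x1 :: x2 :: x3 :: t) 0
          (fun acc d => if PySem.Str.len d.2 == 0 then acc ++ [d.1 ++ ": Is missing input values"] else acc) [],
        PySem.List.foldl_append_if,
        show PySem.List.slice (x0 :: x1 :: x2 :: x3 :: t) (some 2) (some 3)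
             = PySem.List.slice (x0 :: x1 :: x2 :: x3 :: t) (some ((2:Nat):Int)) (some ((3:Nat):Int)) from rfl,
        PySem.List.slice_natCast, h2, h3,
        show List.take (3-2) (List.drop 2 (x0 :: x1 :: x2 :: x3 :: t)) = [x2] from rfl]
    simp only [List.foldl_cons, List.foldl_nil, List.nil_append]
    rw [List.filter_append, List.map_append,
        pv_table_filter (x0 :: x1 :: x2 :: x3 :: t) (fun d => d.2 == "") (fun d => d.1 ++ ": Is missing input values"),
        pv_present x2.2.toList 'U' PySem.Chars.isupper pv_classify_U,
        pv_present x2.2.toList 'D' PySem.Chars.isdigit pv_classify_D,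
        pv_present x2.2.toList 'S' (fun c => "!@#$%^&*()-+?_=,<>/".toList.contains c)
          (fun c => pv_classify_S c)]
    have hfe : (fun (d : String × String) => PySem.Str.len d.2 == 0) = (fun d => d.2 == "") := by
      funext d; exact pv_len_zero d.2
    rw [hfe]
    by_cases hm : x2.2 = x3.2
    · have hne : ¬(x2.2 ≠ x3.2) := by simp [hm]
      have hbne : (x2.2 != x3.2) = false := by simp [hm]
      by_cases hl : x2.2.length < 12 <;>
        cases hu : x2.2.toList.any PySem.Chars.isupper <;>
        cases hd : x2.2.toList.any PySem.Chars.isdigit <;>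
        cases hs : x2.2.toList.any (fun c => "!@#$%^&*()-+?_=,<>/".toList.contains c) <;>
        simp [hne, hbne, hl, hu, hd, hs, List.filter_cons]
    · have hbne : (x2.2 != x3.2) = true := by simp [bne_iff_ne, hm]
      by_cases hl : x2.2.length < 12 <;>
        cases hu : x2.2.toList.any PySem.Chars.isupper <;>
        cases hd : x2.2.toList.any PySem.Chars.isdigit <;>
        cases hs : x2.2.toList.any (fun c => "!@#$%^&*()-+?_=,<>/".toList.contains c) <;>
        simp [hm, hbne, hl, hu, hd, hs, List.filter_cons]
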